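-- pv_equiv track=rewrite | github.com/chrijaque/runpod_chatterbox | handlers/chatterbox/llm_handler.py | _normalize_keyword_id
-- ===== SOURCE A (Python) =====
-- from typing import Optional, Dict, Any
--
-- def _normalize_keyword_id(token: str, keyword_constraints: list) -> Optional[str]:
--     """
--     Map model outputs like 'ass to mouth' -> 'ass_to_mouth' using known ids/names.
--     """
--     if not token:
--         return None
--     t = str(token).strip().lower()
--     t = t.replace("-", "_").replace(" ", "_")
--     # Build lookup from constraints
--     ids = set()
--     name_map: Dict[str, str] = {}
--     for k in keyword_constraints or []:
--         try:
--             kid = str(k.get("id") or "").strip().lower()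
--             if kid:
--                 ids.add(kid)
--             nm = str(k.get("name") or "").strip().lower()
--             if nm:
--                 name_map[nm.replace(" ", "_").replace("-", "_")] = kid
--         except Exception:
--             continue
--     if t in ids:
--         return t
--     if t in name_map and name_map[t]:
--         return name_map[t]
--     return None
-- ===== SOURCE B (Python) =====
-- from typing import Optional
--
-- def _normalize_keyword_id(token: str, keyword_constraints: list) -> Optional[str]:
--     """Single backward pass: scan reversed constraints once, returning the token on the
--     first id match and capturing the first (reversed) name match's id, which is A's
--     last-wins name semantics; no set/dict index and no second pass."""
--     if not token:
--         return None
--     t = str(token).strip().lower().replace("-", "_").replace(" ", "_")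
--     if not t:
--         return None
--     name_kid = None
--     for k in reversed(keyword_constraints or []):
--         try:
--             if str(k.get("id") or "").strip().lower() == t:
--                 return t
--             if name_kid is None:
--                 nm = str(k.get("name") or "").strip().lower().replace(" ", "_").replace("-", "_")
--                 if nm == t:
--                     name_kid = str(k.get("id") or "").strip().lower()
--         except Exception:
--             continue
--     return name_kid or None
-- ===== Notes on version B (the rewrite author's own statement) =====
-- stated objective: alternative
-- what changed: Replaces A's build-a-set-and-dict-then-lookup with a single backward pass over the constraints: early return of the token on an id match, first name match in reverse order (= A's last-wins) captured in an accumulator; no lookup structures at all.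
import Mathlib
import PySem

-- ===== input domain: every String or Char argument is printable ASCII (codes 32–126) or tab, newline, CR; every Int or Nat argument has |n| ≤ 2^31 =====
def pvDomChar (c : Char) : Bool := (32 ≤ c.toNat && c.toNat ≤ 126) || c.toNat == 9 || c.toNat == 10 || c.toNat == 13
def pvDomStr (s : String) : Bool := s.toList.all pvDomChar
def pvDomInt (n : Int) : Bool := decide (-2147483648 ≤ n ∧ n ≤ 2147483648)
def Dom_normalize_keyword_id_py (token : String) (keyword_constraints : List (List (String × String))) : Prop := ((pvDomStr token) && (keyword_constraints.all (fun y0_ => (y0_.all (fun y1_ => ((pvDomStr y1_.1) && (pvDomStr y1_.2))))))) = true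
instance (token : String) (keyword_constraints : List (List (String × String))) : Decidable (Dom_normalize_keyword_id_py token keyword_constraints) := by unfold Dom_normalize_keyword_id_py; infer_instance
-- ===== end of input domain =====

-- B replaces A's set/dict index building with one backward pass (early return on id match, first reversed name match = last-wins); objective: alternative, same cost.


-- ===== PORT A =====
-- loop body of A's single constraint pass: accumulate (ids set, name map)
def pvA_step (s : PySem.Set String × PySem.Dict String String) (k : List (String × String)) :
    PySem.Set String × PySem.Dict String String :=
  let kid := PySem.Str.lower (PySem.Str.strip (PySem.Dict.getD ⟨k⟩ "id" ""))   -- str(k.get("id") or "").strip().lower()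
  let s1 := if kid ≠ "" then (PySem.Set.add s.1 kid, s.2) else s
  let nm := PySem.Str.lower (PySem.Str.strip (PySem.Dict.getD ⟨k⟩ "name" "")) -- str(k.get("name") or "").strip().lower()
  if nm ≠ "" then
    (s1.1, s1.2.insert (PySem.Str.replace (PySem.Str.replace nm " " "_") "-" "_") kid)
  else s1

def normalize_keyword_id_py (token : String) (keyword_constraints : List (List (String × String))) : Option String :=
  if token = "" then none
  else
    let t := PySem.Str.replace (PySem.Str.replace (PySem.Str.lower (PySem.Str.strip token)) "-" "_") " " "_"
    let st := keyword_constraints.foldl pvA_step (PySem.Set.empty, PySem.Dict.empty)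
    if st.1.contains t then some t
    else
      -- 'if t in name_map and name_map[t]: return name_map[t]; return None'
      match st.2.get? t with
      | some v => if v ≠ "" then some v else none
      | none => none

-- ===== PORT B =====
def pvB_kid (k : List (String × String)) : String :=
  PySem.Str.lower (PySem.Str.strip (PySem.Dict.getD ⟨k⟩ "id" ""))

def pvB_nameKey (k : List (String × String)) : String :=
  PySem.Str.replace (PySem.Str.replace (PySem.Str.lower (PySem.Str.strip (PySem.Dict.getD ⟨k⟩ "name" ""))) " " "_") "-" "_"

-- B's single loop over the (already reversed) list: early 'return t' on an id match,
-- capture the first name match (name_kid is None → set it), at the end 'return name_kid or None'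
def pvB_loop (t : String) (nameKid : Option String) : List (List (String × String)) → Option String
  | [] => match nameKid with
          | some kid => if kid = "" then none else some kid
          | none => none
  | k :: ks =>
    if pvB_kid k = t then some t
    else
      pvB_loop t
        (match nameKid with
         | none => if pvB_nameKey k = t then some (pvB_kid k) else none
         | some a => some a) ks

def normalize_keyword_id_py_alt (token : String) (keyword_constraints : List (List (String × String))) : Option String :=
  if token = "" then none
  else
    let t := PySem.Str.replace (PySem.Str.replace (PySem.Str.lower (PySem.Str.strip token)) "-" "_") " " "_"
    if t = "" then none
    else pvB_loop t none keyword_constraints.reverse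

-- ===== PRECONDITION & SPEC =====
def Spec_normalize_keyword_id_py (token : String) (keyword_constraints : List (List (String × String))) (out : Option String) : Prop := out = normalize_keyword_id_py_alt token keyword_constraints
instance (token : String) (keyword_constraints : List (List (String × String))) (out : Option String) : Decidable (Spec_normalize_keyword_id_py token keyword_constraints out) := by unfold Spec_normalize_keyword_id_py; infer_instance

-- ===== CLAIM (what is proved, stated in full; the proofs are below) =====
def Claim_equal_normalize_keyword_id_py : Prop := ∀ (token : String) (keyword_constraints : List (List (String × String))), Dom_normalize_keyword_id_py token keyword_constraints → Spec_normalize_keyword_id_py token keyword_constraints (normalize_keyword_id_py token keyword_constraints)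

-- ===== LEMMAS AND PROOFS =====

-- the id of the last constraint of l whose normalized name equals t, if any
def pvLastName (t : String) (l : List (List (String × String))) : Option String :=
  l.foldl (fun acc k => if pvB_nameKey k = t then some (pvB_kid k) else acc) none

-- the id of the first constraint of l whose normalized name equals t, if any
def pvFirstName (t : String) : List (List (String × String)) → Option String
  | [] => none
  | k :: ks => if pvB_nameKey k = t then some (pvB_kid k) else pvFirstName t ks

-- 'name_kid or None'
def pvFinish : Option String → Option String
  | some kid => if kid = "" then none else some kid
  | none => none

-- replacing a single character by a single character never empties a nonempty string
theorem pv_go_ne_nil (o nw : Char) :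
    ∀ (fuel : Nat) (l acc : List Char), acc ≠ [] →
      PySem.Chars.replace.go [o] [nw] fuel l acc ≠ [] := by
  intro fuel
  induction fuel with
  | zero =>
    intro l acc hacc
    simp [PySem.Chars.replace.go]
    intro h
    cases acc <;> simp_all
  | succ n ih =>
    intro l acc hacc
    cases l with
    | nil =>
      simp [PySem.Chars.replace.go]
      cases acc <;> simp_all
    | cons c t =>
      simp only [PySem.Chars.replace.go]
      split
      · exact ih _ _ (by simp)
      · exact ih _ _ (by simp)

theorem pv_replace_single_ne_nil (cs : List Char) (o nw : Char) (h : cs ≠ []) :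
    PySem.Chars.replace cs [o] [nw] ≠ [] := by
  unfold PySem.Chars.replace
  simp only [List.isEmpty_cons, if_false, Bool.false_eq_true]
  cases cs with
  | nil => exact absurd rfl h
  | cons c t =>
    simp only [List.length_cons, PySem.Chars.replace.go]
    split
    · exact pv_go_ne_nil o nw _ _ _ (by simp)
    · exact pv_go_ne_nil o nw _ _ _ (by simp)

theorem pv_strReplace_single_ne (s : String) (o nw : Char) (h : s ≠ "") :
    PySem.Str.replace s (String.ofList [o]) (String.ofList [nw]) ≠ "" := by
  intro hc
  have h1 : (PySem.Str.replace s (String.ofList [o]) (String.ofList [nw])).toList = [] := by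
    rw [hc]; rfl
  rw [PySem.Str.toList_replace] at h1
  have hs : s.toList ≠ [] := by
    intro h2
    apply h
    have h3 := congrArg String.ofList h2
    simpa using h3
  have h4 : PySem.Chars.replace s.toList [o] [nw] = [] := by simpa using h1
  exact pv_replace_single_ne_nil s.toList o nw hs h4

-- nonempty name ⇒ nonempty normalized name key
theorem pv_nameKey_ne (k : List (String × String))
    (h : PySem.Str.lower (PySem.Str.strip (PySem.Dict.getD ⟨k⟩ "name" "")) ≠ "") :
    pvB_nameKey k ≠ "" := by
  unfold pvB_nameKey
  exact pv_strReplace_single_ne _ '-' '_' (pv_strReplace_single_ne _ ' ' '_' h)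

-- the two components of one step of A's loop
theorem pv_step_fst (s : PySem.Set String × PySem.Dict String String) (k : List (String × String)) :
    (pvA_step s k).1 = if pvB_kid k ≠ "" then PySem.Set.add s.1 (pvB_kid k) else s.1 := by
  unfold pvA_step pvB_kid
  by_cases hnm : PySem.Str.lower (PySem.Str.strip (PySem.Dict.getD ⟨k⟩ "name" "")) ≠ "" <;>
    by_cases hkid : PySem.Str.lower (PySem.Str.strip (PySem.Dict.getD ⟨k⟩ "id" "")) ≠ "" <;>
    simp [hnm, hkid]

theorem pv_step_snd (s : PySem.Set String × PySem.Dict String String) (k : List (String × String)) :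
    (pvA_step s k).2 = if PySem.Str.lower (PySem.Str.strip (PySem.Dict.getD ⟨k⟩ "name" "")) ≠ "" then
      s.2.insert (pvB_nameKey k) (pvB_kid k) else s.2 := by
  unfold pvA_step pvB_nameKey pvB_kid
  by_cases hnm : PySem.Str.lower (PySem.Str.strip (PySem.Dict.getD ⟨k⟩ "name" "")) ≠ "" <;>
    by_cases hkid : PySem.Str.lower (PySem.Str.strip (PySem.Dict.getD ⟨k⟩ "id" "")) ≠ "" <;>
    simp [hnm, hkid]

-- "" is never a key of A's name_map
theorem pvA_get_empty : ∀ (l : List (List (String × String)))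
    (s : PySem.Set String × PySem.Dict String String),
    (l.foldl pvA_step s).2.get? "" = s.2.get? "" := by
  intro l
  induction l with
  | nil => intro s; rfl
  | cons k ks ih =>
    intro s
    rw [List.foldl_cons, ih, pv_step_snd]
    by_cases hnm : PySem.Str.lower (PySem.Str.strip (PySem.Dict.getD ⟨k⟩ "name" "")) ≠ ""
    · rw [if_pos hnm, PySem.Dict.get?_insert, if_neg (Ne.symm (pv_nameKey_ne k hnm))]
    · rw [if_neg hnm]

-- membership in A's ids set
theorem pvA_contains (t : String) : ∀ (l : List (List (String × String)))
    (s : PySem.Set String × PySem.Dict String String),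
    ((l.foldl pvA_step s).1.contains t = true) ↔
      (s.1.contains t = true ∨ ∃ k ∈ l, pvB_kid k = t ∧ pvB_kid k ≠ "") := by
  intro l
  induction l with
  | nil => intro s; rw [List.foldl_nil]; simp
  | cons k ks ih =>
    intro s
    rw [List.foldl_cons, ih, pv_step_fst]
    by_cases hkid : pvB_kid k ≠ ""
    · rw [if_pos hkid]
      rw [PySem.Set.contains_iff, PySem.Set.mem_add, ← PySem.Set.contains_iff]
      constructor
      · rintro (⟨h | h⟩ | h)
        · exact Or.inl h
        · exact Or.inr ⟨k, by simp, h.symm, hkid⟩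
        · obtain ⟨k', hk', h1, h2⟩ := h
          exact Or.inr ⟨k', by simp [hk'], h1, h2⟩
      · rintro (h | ⟨k', hk', h1, h2⟩)
        · exact Or.inl (Or.inl h)
        · rcases (List.mem_cons).mp hk' with h3 | h3
          · exact Or.inl (Or.inr (by rw [← h3]; exact h1.symm))
          · exact Or.inr ⟨k', h3, h1, h2⟩
    · rw [if_neg hkid]
      constructor
      · rintro (h | ⟨k', hk', h1, h2⟩)
        · exact Or.inl h
        · exact Or.inr ⟨k', by simp [hk'], h1, h2⟩
      · rintro (h | ⟨k', hk', h1, h2⟩)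
        · exact Or.inl h
        · rcases (List.mem_cons).mp hk' with h3 | h3
          · exact absurd (h3 ▸ h2) (by simp_all)
          · exact Or.inr ⟨k', h3, h1, h2⟩

-- an accumulator-generalized description of the last-match fold
theorem pvLN_acc (t : String) : ∀ (l : List (List (String × String))) (a : Option String),
    l.foldl (fun acc k => if pvB_nameKey k = t then some (pvB_kid k) else acc) a =
      match pvLastName t l with
      | some v => some v
      | none => a := by
  intro l
  induction l with
  | nil => intro a; rfl
  | cons k ks ih =>
    intro a
    rw [List.foldl_cons, ih]
    have hK : pvLastName t (k :: ks) =
        match pvLastName t ks with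
        | some v => some v
        | none => if pvB_nameKey k = t then some (pvB_kid k) else none := by
      unfold pvLastName
      rw [List.foldl_cons, ih]
      rfl
    rw [hK]
    cases hks : pvLastName t ks with
    | some v => rfl
    | none => by_cases hk : pvB_nameKey k = t <;> simp [hk]

-- nm = "" forces an empty normalized name key
theorem pv_nameKey_empty (k : List (String × String))
    (h : PySem.Str.lower (PySem.Str.strip (PySem.Dict.getD ⟨k⟩ "name" "")) = "") :
    pvB_nameKey k = "" := by
  unfold pvB_nameKey
  rw [h]
  decide

-- A's name_map lookup, for a nonempty token key, is the last-match lookup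
theorem pvA_get (t : String) (ht : t ≠ "") : ∀ (l : List (List (String × String)))
    (s : PySem.Set String × PySem.Dict String String),
    (l.foldl pvA_step s).2.get? t =
      match pvLastName t l with
      | some v => some v
      | none => s.2.get? t := by
  intro l
  induction l with
  | nil => intro s; rfl
  | cons k ks ih =>
    intro s
    rw [List.foldl_cons, ih, pv_step_snd]
    have hK : pvLastName t (k :: ks) =
        match pvLastName t ks with
        | some v => some v
        | none => if pvB_nameKey k = t then some (pvB_kid k) else none := by
      unfold pvLastName
      rw [List.foldl_cons, pvLN_acc]
      rfl
    rw [hK]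
    cases hks : pvLastName t ks with
    | some v => rfl
    | none =>
      by_cases hk : pvB_nameKey k = t
      · have hnm : PySem.Str.lower (PySem.Str.strip (PySem.Dict.getD ⟨k⟩ "name" "")) ≠ "" := by
          intro h0
          exact ht (hk ▸ pv_nameKey_empty k h0)
        rw [if_pos hnm, PySem.Dict.get?_insert, if_pos hk.symm, if_pos hk]
      · rw [if_neg hk]
        by_cases hnm : PySem.Str.lower (PySem.Str.strip (PySem.Dict.getD ⟨k⟩ "name" "")) ≠ ""
        · rw [if_pos hnm, PySem.Dict.get?_insert, if_neg (fun h => hk h.symm)]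
        · rw [if_neg hnm]

-- B's loop: early id-return, else finish with the accumulator or the first name match
theorem pvB_loop_eq (t : String) : ∀ (l : List (List (String × String))) (acc : Option String),
    pvB_loop t acc l =
      if l.any (fun k => pvB_kid k == t) then some t
      else pvFinish (match acc with
                     | some a => some a
                     | none => pvFirstName t l) := by
  intro l
  induction l with
  | nil =>
    intro acc
    rw [if_neg (by simp)]
    cases acc <;> rfl
  | cons k ks ih =>
    intro acc
    simp only [pvB_loop]
    by_cases hk : pvB_kid k = t
    · rw [if_pos hk, if_pos (by simp [List.any_cons, hk])]
    · rw [if_neg hk, ih]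
      have hany : ((k :: ks).any fun k => pvB_kid k == t) = (ks.any fun k => pvB_kid k == t) := by
        simp [List.any_cons, hk]
      rw [hany]
      by_cases hks : ks.any (fun k => pvB_kid k == t) = true
      · rw [if_pos hks, if_pos hks]
      · rw [if_neg hks, if_neg hks]
        cases acc with
        | some a => rfl
        | none =>
          by_cases hn : pvB_nameKey k = t <;> simp [pvFirstName, hn]

-- first match distributes over append
theorem pvFN_append (t : String) : ∀ (a b : List (List (String × String))),
    pvFirstName t (a ++ b) =
      match pvFirstName t a with
      | some v => some v
      | none => pvFirstName t b := by
  intro a b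
  induction a with
  | nil => rfl
  | cons k ks ih =>
    show pvFirstName t (k :: (ks ++ b)) = _
    unfold pvFirstName
    by_cases hk : pvB_nameKey k = t
    · rw [if_pos hk, if_pos hk]
    · rw [if_neg hk, if_neg hk, ih]
      cases pvFirstName t ks with
      | some v => rfl
      | none => cases b <;> rfl

-- first match of the reversed list = last match of the list
theorem pvFN_reverse (t : String) : ∀ (l : List (List (String × String))),
    pvFirstName t l.reverse = pvLastName t l := by
  intro l
  induction l with
  | nil => rfl
  | cons k ks ih =>
    have hK : pvLastName t (k :: ks) =
        match pvLastName t ks with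
        | some v => some v
        | none => if pvB_nameKey k = t then some (pvB_kid k) else none := by
      unfold pvLastName
      rw [List.foldl_cons, pvLN_acc]
      rfl
    rw [List.reverse_cons, pvFN_append, ih, hK]
    cases pvLastName t ks with
    | some v => rfl
    | none => by_cases hk : pvB_nameKey k = t <;> simp [pvFirstName, hk]

-- ===== VERDICT (by name: the statement is the Claim_ definition above) =====
theorem normalize_keyword_id_py_spec : Claim_equal_normalize_keyword_id_py := by
  intro token kcs _
  unfold Spec_normalize_keyword_id_py normalize_keyword_id_py normalize_keyword_id_py_alt
  by_cases htok : token = ""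
  · rw [if_pos htok, if_pos htok]
  · rw [if_neg htok, if_neg htok]
    set t := PySem.Str.replace (PySem.Str.replace (PySem.Str.lower (PySem.Str.strip token)) "-" "_") " " "_" with hT
    by_cases ht : t = ""
    · rw [if_pos ht]
      have hc : ¬ ((kcs.foldl pvA_step (PySem.Set.empty, PySem.Dict.empty)).1.contains t = true) := by
        intro h
        rcases (pvA_contains t kcs _).mp h with h | ⟨k, _, h1, h2⟩
        · simp [PySem.Set.empty] at h
        · exact h2 (by rw [h1, ht])
      rw [if_neg hc, ht, pvA_get_empty]
      rfl
    · rw [if_neg ht]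
      rw [pvB_loop_eq, List.any_reverse]
      have hcontains : ((kcs.foldl pvA_step (PySem.Set.empty, PySem.Dict.empty)).1.contains t = true) ↔
          (kcs.any (fun k => pvB_kid k == t) = true) := by
        rw [pvA_contains t kcs _]
        constructor
        · rintro (h | ⟨k, hk, h1, _⟩)
          · simp [PySem.Set.empty] at h
          · simp only [List.any_eq_true]; exact ⟨k, hk, by simp [h1]⟩
        · rintro h
          simp only [List.any_eq_true, beq_iff_eq] at h
          obtain ⟨k, hk, h1⟩ := h
          exact Or.inr ⟨k, hk, h1, by rw [h1]; exact ht⟩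
      by_cases hid : kcs.any (fun k => pvB_kid k == t) = true
      · rw [if_pos (hcontains.mpr hid), if_pos hid]
      · rw [if_neg (fun h => hid (hcontains.mp h)), if_neg hid]
        rw [pvA_get t ht kcs _, pvFN_reverse]
        cases hlast : pvLastName t kcs with
        | some v =>
          show (if v ≠ "" then some v else none) = pvFinish (some v)
          unfold pvFinish
          by_cases hv : v = "" <;> simp [hv]
        | none =>
          show (PySem.Dict.empty : PySem.Dict String String).get? t = pvFinish none
          simp [PySem.Dict.empty, PySem.Dict.get?, pvFinish]
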